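-- pv_equiv track=rewrite | github.com/Mujoung-Kim/DataStructure_Study | Algorithm_Code/example/summer_winter_coding/lv_1/budget.py | solution
-- ===== SOURCE A (Python) =====
-- import itertools
--
-- def solution(d, budget) :
-- 	d.sort()
-- 	result = list()
--
-- 	for x in range(len(d) + 1) :
-- 		for items in itertools.combinations(d, x) :
-- 			if sum(items) == budget :
-- 				result.append(len(items))
--
-- 	return max(result)
-- ===== SOURCE B (Python) =====
-- def solution(d, budget):
--     # one left-to-right pass doubling a list of (subset-sum, subset-size) pairs,
--     # instead of sorting + enumerating combinations size by size
--     subs = [(0, 0)]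
--     for c in d:
--         subs += [(s + c, k + 1) for (s, k) in subs]
--     return max(k for (s, k) in subs if s == budget)
-- ===== Notes on version B (the rewrite author's own statement) =====
-- stated objective: alternative
-- what changed: Instead of sorting d and enumerating itertools.combinations size by size, summing each tuple from scratch, B makes one pass over d that doubles a list of (subset-sum, subset-size) pairs so sums are extended incrementally, then takes the max size among pairs whose sum equals budget; measured only ~1.2x, so not claimed faster.
import Mathlib
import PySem

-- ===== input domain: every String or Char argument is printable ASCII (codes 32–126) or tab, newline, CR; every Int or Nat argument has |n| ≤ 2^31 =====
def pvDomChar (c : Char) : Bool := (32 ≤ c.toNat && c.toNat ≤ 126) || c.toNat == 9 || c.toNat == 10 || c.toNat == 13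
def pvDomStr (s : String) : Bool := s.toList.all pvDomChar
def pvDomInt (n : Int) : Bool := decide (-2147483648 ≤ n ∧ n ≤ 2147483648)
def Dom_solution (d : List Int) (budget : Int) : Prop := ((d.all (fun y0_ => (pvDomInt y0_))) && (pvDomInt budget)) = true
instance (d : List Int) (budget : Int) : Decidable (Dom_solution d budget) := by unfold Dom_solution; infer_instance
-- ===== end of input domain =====

-- B replaces A's sort + size-by-size combinations enumeration (each tuple summed from scratch) by one
-- doubling pass over d that extends (subset-sum, subset-size) pairs incrementally; equivalence is about
-- the RETURN value only (Python A additionally sorts its argument d in place, B does not mutate it).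

-- ===== PORT A =====
def solution (d : List Int) (budget : Int) : Int :=
  let ds := PySem.List.sorted d (fun v => v)          -- d.sort()
  let result : List Int :=
    (List.range (ds.length + 1)).foldl (fun result x =>     -- for x in range(len(d) + 1)
      (PySem.List.combinations ds x).foldl (fun result items =>   -- for items in itertools.combinations(d, x)
        if items.sum == budget then result ++ [(items.length : Int)] else result) result) []
  (PySem.List.max? result (fun v => v)).getD 0        -- max(result); ValueError on [] is excluded by Pre_

-- ===== PORT B =====
def solution_alt (d : List Int) (budget : Int) : Int :=
  let subs : List (Int × Int) :=
    d.foldl (fun subs c => subs ++ subs.map (fun p => (p.1 + c, p.2 + 1))) [(0, 0)]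
  (PySem.List.max? ((subs.filter (fun p => p.1 == budget)).map (fun p => p.2)) (fun v => v)).getD 0

-- ===== PRECONDITION & SPEC =====
-- Pre_ excludes exactly the inputs where no subset of d sums to budget: there Python A (and B alike)
-- raises ValueError from max() on an empty sequence.
def Pre_solution (d : List Int) (budget : Int) : Prop := ∃ s ∈ d.sublists', s.sum = budget
instance (d : List Int) (budget : Int) : Decidable (Pre_solution d budget) := by unfold Pre_solution; infer_instance
def pvWitness_solution : List Int × Int := ([1, 2, 3], 3)
def Spec_solution (d : List Int) (budget : Int) (out : Int) : Prop := out = solution_alt d budget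
instance (d : List Int) (budget : Int) (out : Int) : Decidable (Spec_solution d budget out) := by unfold Spec_solution; infer_instance

-- ===== CLAIM (what is proved, stated in full; the proofs are below) =====
def Claim_equal_solution : Prop := ∀ (d : List Int) (budget : Int), Dom_solution d budget → Pre_solution d budget → Spec_solution d budget (solution d budget)

-- ===== LEMMAS AND PROOFS =====

-- (sum, length) of a subset: the quantity both programs aggregate
def pvPair (s : List Int) : Int × Int := (s.sum, (s.length : Int))

-- A's joined enumeration: all combinations of every size
def pvCJ (l : List Int) : List (List Int) :=
  (List.range (l.length + 1)).flatMap (fun x => PySem.List.combinations l x)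

-- A's enumeration of combinations size by size lists every sublist exactly once
theorem pvCJ_perm (l : List Int) : (pvCJ l).Perm l.sublists' := by
  induction l with
  | nil => simp [pvCJ, PySem.List.combinations]
  | cons a as ih =>
      have hsplit : ∀ m : List Int, pvCJ m = PySem.List.combinations m 0
          ++ (List.range m.length).flatMap (fun k => PySem.List.combinations m (k + 1)) := by
        intro m
        rw [pvCJ, List.range_succ_eq_map, List.flatMap_cons, List.flatMap_map]
      have htail : (List.range as.length).flatMap (fun k => PySem.List.combinations as (k + 1))
          = (pvCJ as).tail := by
        have h2 : pvCJ as = [[]] ++ (List.range as.length).flatMap (fun k => PySem.List.combinations as (k + 1)) := by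
          rw [hsplit as, PySem.List.combinations_zero]
        rw [h2]; rfl
      have hhead : pvCJ as = [[]] ++ (pvCJ as).tail := by
        rw [hsplit as, PySem.List.combinations_zero]; rfl
      rw [hsplit (a :: as), PySem.List.combinations_zero]
      simp only [List.length_cons, PySem.List.combinations_cons_succ]
      refine List.Perm.trans (List.Perm.append_left [[]] (List.flatMap_append_perm _ _ _).symm) ?_
      have hmapped : (List.range (as.length + 1)).flatMap
            (fun k => (PySem.List.combinations as k).map (fun c => a :: c))
          = (pvCJ as).map (fun c => a :: c) := by
        rw [pvCJ, List.map_flatMap]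
      have hsucc : (List.range (as.length + 1)).flatMap (fun k => PySem.List.combinations as (k + 1))
          = (pvCJ as).tail := by
        rw [List.range_succ, List.flatMap_append, htail]
        simp [PySem.List.combinations_eq_nil_of_length_lt]
      rw [hmapped, hsucc]
      refine List.Perm.trans (List.Perm.append_left [[]] (List.perm_append_comm)) ?_
      rw [← List.append_assoc, ← hhead]
      rw [List.sublists'_cons]
      exact ih.append (ih.map _)

-- B's doubling pass lists, up to order, one (acc-shifted) pair per sublist
theorem pvFold_perm (l : List Int) (acc : List (Int × Int)) :
    (l.foldl (fun subs c => subs ++ subs.map (fun p => (p.1 + c, p.2 + 1))) acc).Perm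
      (l.sublists'.flatMap (fun s => acc.map (fun p => (p.1 + s.sum, p.2 + (s.length : Int))))) := by
  induction l generalizing acc with
  | nil => simp
  | cons c cs ih =>
      rw [List.foldl_cons]
      refine (ih _).trans ?_
      rw [List.sublists'_cons, List.flatMap_append, List.flatMap_map]
      have e2 : ∀ s : List Int,
          ((acc ++ acc.map (fun p : Int × Int => (p.1 + c, p.2 + 1))).map
              (fun p : Int × Int => (p.1 + s.sum, p.2 + (s.length : Int))))
          = acc.map (fun p : Int × Int => (p.1 + s.sum, p.2 + (s.length : Int)))
            ++ acc.map (fun p : Int × Int => (p.1 + (c :: s).sum, p.2 + ((c :: s).length : Int))) := by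
        intro s
        rw [List.map_append, List.map_map]
        congr 1
        apply List.map_congr_left
        intro p _
        simp only [Function.comp_apply, List.sum_cons, List.length_cons, Prod.mk.injEq]
        push_cast
        constructor <;> ring
      simp only [e2]
      exact (List.flatMap_append_perm _ _ _).symm

-- the (sum, length) multiset over sublists is invariant under permuting the base list
theorem pvPairs_perm (l1 l2 : List Int) (h : l1.Perm l2) :
    (l1.sublists'.map pvPair).Perm (l2.sublists'.map pvPair) := by
  rw [← Multiset.coe_eq_coe]
  have key : ∀ l : List Int, ((l.sublists'.map pvPair) : Multiset (Int × Int))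
      = Multiset.map (fun m : Multiset Int => (m.sum, (m.card : Int))) ((l : Multiset Int).powerset) := by
    intro l
    rw [Multiset.powerset_coe', ← Multiset.map_coe, ← Multiset.map_coe, Multiset.map_map]
    congr 1
  rw [key, key, Multiset.coe_eq_coe.mpr h]

-- max (no key) over Int lists depends only on the multiset of values
theorem pvMax?_perm (l1 l2 : List Int) (h : l1.Perm l2) :
    PySem.List.max? l1 (fun v => v) = PySem.List.max? l2 (fun v => v) := by
  cases h1 : PySem.List.max? l1 (fun v => v) with
  | none =>
      rw [PySem.List.max?_eq_none_iff] at h1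
      subst h1
      rw [eq_comm, PySem.List.max?_eq_none_iff]
      exact h.symm.eq_nil
  | some m1 =>
      cases h2 : PySem.List.max? l2 (fun v => v) with
      | none =>
          rw [PySem.List.max?_eq_none_iff] at h2
          subst h2
          exact absurd (h.subset (PySem.List.max?_mem h1)) (List.not_mem_nil)
      | some m2 =>
          have hm1 : m1 ∈ l2 := h.subset (PySem.List.max?_mem h1)
          have hm2 : m2 ∈ l1 := h.symm.subset (PySem.List.max?_mem h2)
          have := PySem.List.max?_isMax h2 m1 hm1
          have := PySem.List.max?_isMax h1 m2 hm2
          simp only [Option.some.injEq]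
          omega

-- ===== VERDICT (by name: the statement is the Claim_ definition above) =====
theorem solution_spec : Claim_equal_solution := by
  intro d budget _ _
  unfold Spec_solution solution solution_alt
  simp only []
  set ds := PySem.List.sorted d (fun v => v) with hds
  have hN : ∀ l : List Int,
      ((l.sublists'.map pvPair).filter (fun q => q.1 == budget)).map (fun q => q.2)
      = (l.sublists'.filter (fun s : List Int => s.sum == budget)).map (fun s : List Int => (s.length : Int)) := by
    intro l
    rw [List.filter_map, List.map_map]
    rfl
  have hA : (List.range (ds.length + 1)).foldl (fun result x =>
        (PySem.List.combinations ds x).foldl (fun result items =>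
          if items.sum == budget then result ++ [(items.length : Int)] else result) result) []
      = ((pvCJ ds).filter (fun s : List Int => s.sum == budget)).map (fun s : List Int => (s.length : Int)) := by
    simp only [PySem.List.foldl_append_if (fun s : List Int => s.sum == budget) (fun s : List Int => (s.length : Int))]
    rw [PySem.List.foldl_append_eq_flatMap]
    rw [List.nil_append, pvCJ, List.filter_flatMap, List.map_flatMap]
  rw [hA]
  have permA : (((pvCJ ds).filter (fun s : List Int => s.sum == budget)).map (fun s : List Int => (s.length : Int))).Perm
      (((d.foldl (fun subs c => subs ++ subs.map (fun p => (p.1 + c, p.2 + 1))) [(0, 0)]).filter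
          (fun p : Int × Int => p.1 == budget)).map (fun p : Int × Int => p.2)) := by
    have h1 : (((pvCJ ds).filter (fun s : List Int => s.sum == budget)).map (fun s : List Int => (s.length : Int))).Perm
        ((ds.sublists'.filter (fun s : List Int => s.sum == budget)).map (fun s : List Int => (s.length : Int))) :=
      ((pvCJ_perm ds).filter _).map _
    have h2 : ((ds.sublists'.filter (fun s : List Int => s.sum == budget)).map (fun s : List Int => (s.length : Int))).Perm
        ((d.sublists'.filter (fun s : List Int => s.sum == budget)).map (fun s : List Int => (s.length : Int))) := by
      rw [← hN, ← hN]
      exact ((pvPairs_perm ds d (PySem.List.sorted_perm d _ _)).filter _).map _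
    have hsubs : ((d.foldl (fun subs c => subs ++ subs.map (fun p => (p.1 + c, p.2 + 1))) [(0, 0)]).Perm
        (d.sublists'.map pvPair)) := by
      refine (pvFold_perm d [(0,0)]).trans ?_
      have : (d.sublists'.flatMap (fun s => ([((0:Int), (0:Int))]).map (fun p => (p.1 + s.sum, p.2 + (s.length : Int)))))
          = d.sublists'.map pvPair := by
        rw [List.map_eq_flatMap]
        simp [pvPair]
      rw [this]
    have h3 : ((d.sublists'.filter (fun s : List Int => s.sum == budget)).map (fun s : List Int => (s.length : Int))).Perm
        (((d.foldl (fun subs c => subs ++ subs.map (fun p => (p.1 + c, p.2 + 1))) [(0, 0)]).filter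
          (fun p : Int × Int => p.1 == budget)).map (fun p : Int × Int => p.2)) := by
      rw [← hN]
      exact ((hsubs.symm.filter _).map _)
    exact (h1.trans h2).trans h3
  rw [pvMax?_perm _ _ permA]
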